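-- pv_equiv track=rewrite | github.com/ckdrjs96/algorithm | programmers/level3/스티커 모으기2.py | solution
-- ===== SOURCE A (Python) =====
-- def solution(sticker):
--     n=len(sticker)
--
--     def collect(start):
--         dp=[0]*n
--         dp[start]=sticker[start]
--         dp[start+1]=sticker[start]
--         for i in range(start+2,n-1+start):
--             dp[i%n] = max(dp[(i-1)%n],dp[(i-2)%n]+sticker[i%n])
--         return dp[(start-2+n)%n]
--
--     if n<4:
--         return max(sticker)
--     return max(collect(0),collect(1),collect(2)) #시작점 위치 0,1,2
-- ===== SOURCE B (Python) =====
-- def solution(sticker):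
--     n = len(sticker)
--     if n < 4:
--         return max(sticker)
--
--     def quad(seq):
--         # (best(seq), best(seq[1:]), best(seq[:-1]), best(seq[1:-1]))
--         # where best = max non-adjacent sum, empty selection allowed;
--         # divide and conquer: combine halves across the cut boundary.
--         if len(seq) == 1:
--             x = seq[0]
--             return (max(0, x), 0, 0, 0)
--         m = len(seq) // 2
--         fL, tL, dL, tdL = quad(seq[:m])
--         fR, tR, dR, tdR = quad(seq[m:])
--         return (max(fL + tR, dL + fR),
--                 max(tL + tR, tdL + fR),
--                 max(fL + tdR, dL + dR),
--                 max(tL + tdR, tdL + dR))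
--
--     doubled = sticker + sticker
--     return max(sticker[s] + quad(doubled[s + 2:s + n - 1])[0] for s in range(3))
-- ===== Notes on version B (the rewrite author's own statement) =====
-- stated objective: alternative
-- what changed: Replaces the three linear DP passes over modular indices by a divide-and-conquer on three plain slices of the doubled list: each segment is summarized by a quadruple (best non-adjacent sum with first/last element allowed or forbidden) and quadruples of halves are merged by a constant-size max-plus combine; no dp array and no per-step modular arithmetic.
import Mathlib
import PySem

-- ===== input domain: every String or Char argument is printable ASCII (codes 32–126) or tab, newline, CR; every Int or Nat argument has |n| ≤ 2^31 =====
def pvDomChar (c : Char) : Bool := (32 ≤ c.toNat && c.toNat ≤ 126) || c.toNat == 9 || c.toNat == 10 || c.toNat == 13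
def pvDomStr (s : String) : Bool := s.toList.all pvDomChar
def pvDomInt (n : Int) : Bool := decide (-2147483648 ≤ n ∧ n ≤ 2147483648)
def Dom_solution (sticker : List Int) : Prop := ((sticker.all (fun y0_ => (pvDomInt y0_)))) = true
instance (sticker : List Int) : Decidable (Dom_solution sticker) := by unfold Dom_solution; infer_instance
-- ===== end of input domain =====

-- B replaces A's three modular-index DP-array passes by a divide-and-conquer over three plain
-- slices of the doubled list, merging per-segment quadruples (objective: alternative algorithm).
-- ===== PORT A =====
-- helper 'collect(start)' of A, transliterated (dp array, modular indices)
def pvCollect (sticker : List Int) (n start : Int) : Int :=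
  let dp : List Int := List.replicate n.toNat 0
  let dp := PySem.List.pySetD dp start (PySem.List.pyGetD sticker start 0)
  let dp := PySem.List.pySetD dp (start + 1) (PySem.List.pyGetD sticker start 0)
  let dp := (PySem.List.pyRange (start + 2) (n - 1 + start) 1).foldl
    (fun dp i =>
      PySem.List.pySetD dp (PySem.Int.mod i n)
        (max (PySem.List.pyGetD dp (PySem.Int.mod (i - 1) n) 0)
             (PySem.List.pyGetD dp (PySem.Int.mod (i - 2) n) 0 +
              PySem.List.pyGetD sticker (PySem.Int.mod i n) 0))) dp
  PySem.List.pyGetD dp (PySem.Int.mod (start - 2 + n) n) 0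

def solution (sticker : List Int) : Int :=
  let n : Int := sticker.length
  if n < 4 then (PySem.List.max? sticker (fun y => y)).getD 0
  else max (max (pvCollect sticker n 0) (pvCollect sticker n 1)) (pvCollect sticker n 2)

-- ===== PORT B =====
-- helper 'quad(seq)' of B: quadruple (best seq, best seq[1:], best seq[:-1], best seq[1:-1])
-- of non-adjacent maxima, computed by divide and conquer; the Python helper is only ever
-- called on non-empty lists, the [] case here is the natural total extension.
def pvQuad : List Int → Int × Int × Int × Int
  | [] => (0, 0, 0, 0)
  | [x] => (max 0 x, 0, 0, 0)
  | x :: y :: t =>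
    let l := x :: y :: t
    let m := l.length / 2
    let (fL, tL, dL, tdL) := pvQuad (l.take m)
    let (fR, tR, dR, tdR) := pvQuad (l.drop m)
    (max (fL + tR) (dL + fR), max (tL + tR) (tdL + fR),
     max (fL + tdR) (dL + dR), max (tL + tdR) (tdL + dR))
termination_by l => l.length
decreasing_by
  · simp only [List.length_take]; simp; omega
  · simp only [List.length_drop]; simp; omega

def solution_alt (sticker : List Int) : Int :=
  let n : Int := sticker.length
  if n < 4 then (PySem.List.max? sticker (fun y => y)).getD 0
  else
    let doubled := sticker ++ sticker
    (PySem.List.max? ((PySem.List.pyRange 0 3 1).map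
      (fun s => PySem.List.pyGetD sticker s 0 +
        (pvQuad (PySem.List.slice doubled (some (s + 2)) (some (s + n - 1)))).1))
      (fun y => y)).getD 0

-- ===== PRECONDITION & SPEC =====
-- Pre_ excludes only the empty list, on which A's max(sticker) raises ValueError.
def Pre_solution (sticker : List Int) : Prop := sticker ≠ []
instance (sticker : List Int) : Decidable (Pre_solution sticker) := by unfold Pre_solution; infer_instance
def pvWitness_solution : List Int := [1, 2, 3, 4, 5]

def Spec_solution (sticker : List Int) (out : Int) : Prop := out = solution_alt sticker
instance (sticker : List Int) (out : Int) : Decidable (Spec_solution sticker out) := by unfold Spec_solution; infer_instance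

-- ===== CLAIM (what is proved, stated in full; the proofs are below) =====
def Claim_equal_solution : Prop := ∀ (sticker : List Int), Dom_solution sticker → Pre_solution sticker → Spec_solution sticker (solution sticker)

-- ===== LEMMAS AND PROOFS =====

-- the abstract recurrence A's inner loop computes: (prev, cur) after m steps over f 0, …, f (m-1)
def pvStep (p : Int × Int) (x : Int) : Int × Int := (p.2, max p.2 (p.1 + x))

def pvPair (f : Nat → Int) : Nat → Int × Int
  | 0 => (0, 0)
  | m + 1 => pvStep (pvPair f m) (f m)

-- the element sequence seen by collect(s): sticker[(s+2+k) % n]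
def pvF (sticker : List Int) (s k : Nat) : Int := sticker.getD ((s + 2 + k) % sticker.length) 0

theorem pvPair_congr (f g : Nat → Int) (m : Nat) (h : ∀ k < m, f k = g k) :
    pvPair f m = pvPair g m := by
  induction m with
  | zero => rfl
  | succ m ih => simp only [pvPair, ih (fun k hk => h k (by omega)), h m (by omega)]

theorem foldl_eq_pvPair (l : List Int) :
    l.foldl pvStep (0, 0) = pvPair (fun k => l.getD k 0) l.length := by
  induction l using List.reverseRecOn with
  | nil => rfl
  | append_singleton l x ih =>
      rw [List.foldl_append, ih]
      have hl : (l ++ [x]).length = l.length + 1 := by simp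
      rw [hl]
      have h1 : pvPair (fun k => (l ++ [x]).getD k 0) l.length
          = pvPair (fun k => l.getD k 0) l.length := by
        refine pvPair_congr _ _ _ (fun k hk => ?_)
        simp [List.getD, List.getElem?_append_left hk]
      have h2 : (l ++ [x]).getD l.length 0 = x := by simp [List.getD]
      calc List.foldl pvStep (pvPair (fun k => l.getD k 0) l.length) [x]
          = pvStep (pvPair (fun k => l.getD k 0) l.length) x := rfl
        _ = pvStep (pvPair (fun k => (l ++ [x]).getD k 0) l.length)
              ((l ++ [x]).getD l.length 0) := by rw [h1, h2]
        _ = pvPair (fun k => (l ++ [x]).getD k 0) (l.length + 1) := rfl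

-- the mathematical value both sides compute per window: best non-adjacent sum (empty allowed)
def pvQ : List Int → Int
  | [] => 0
  | x :: t => max (x + pvQ t.tail) (pvQ t)
termination_by l => l.length
decreasing_by
  · simp only [List.length_tail, List.length_cons]; omega
  · simp

theorem pvQ_tail_le (l : List Int) : pvQ l.tail ≤ pvQ l := by
  cases l with
  | nil => simp
  | cons x t => rw [pvQ]; exact le_max_right _ _

theorem tail_dropLast (l : List α) : l.dropLast.tail = l.tail.dropLast := by
  cases l with
  | nil => rfl
  | cons x t =>
    cases t with
    | nil => rfl
    | cons y u => simp

theorem pvQ_dropLast_le (l : List Int) : pvQ l.dropLast ≤ pvQ l := by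
  induction l using pvQ.induct with
  | case1 => simp
  | case2 x t ih1 ih2 =>
    cases t with
    | nil =>
      show pvQ [] ≤ pvQ [x]
      simp only [pvQ, List.tail_nil]
      omega
    | cons y u =>
      rw [show (x :: y :: u).dropLast = x :: (y :: u).dropLast from by simp, pvQ, pvQ]
      rw [tail_dropLast]
      exact max_le_max (by omega) ih2

theorem foldl_step_snd (l : List Int) : ∀ p c : Int, p ≤ c →
    (l.foldl pvStep (p, c)).2 = max (p + pvQ l) (c + pvQ l.tail) := by
  induction l with
  | nil => intro p c h; simp [pvQ]; omega
  | cons x t ih =>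
    intro p c h
    have h1 : c ≤ max c (p + x) := le_max_left _ _
    have h2 := ih c (max c (p + x)) h1
    have h3 := pvQ_tail_le t
    simp only [List.foldl_cons, pvStep] at h2 ⊢
    rw [h2, pvQ, List.tail_cons]
    omega

theorem foldl_step_zero_snd (l : List Int) : (l.foldl pvStep (0, 0)).2 = pvQ l := by
  rw [foldl_step_snd l 0 0 le_rfl]
  have := pvQ_tail_le l
  omega

theorem foldl_step_zero_fst (l : List Int) (h : l ≠ []) :
    (l.foldl pvStep (0, 0)).1 = pvQ l.dropLast := by
  obtain ⟨d, a, rfl⟩ : ∃ d a, l = d ++ [a] := by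
    rcases List.eq_nil_or_concat l with h' | ⟨d, a, h'⟩
    · exact absurd h' h
    · exact ⟨d, a, by simpa using h'⟩
  rw [List.foldl_append, List.dropLast_concat]
  simp only [List.foldl_cons, List.foldl_nil, pvStep]
  exact foldl_step_zero_snd d

theorem pvQ_append (l1 l2 : List Int) :
    pvQ (l1 ++ l2) = max (pvQ l1 + pvQ l2.tail) (pvQ l1.dropLast + pvQ l2) := by
  cases h : l1 with
  | nil =>
    have := pvQ_tail_le l2
    simp [pvQ]; omega
  | cons x t =>
    rw [← h]
    have h1 : l1 ≠ [] := by rw [h]; simp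
    have hfold : l1.foldl pvStep (0, 0) = (pvQ l1.dropLast, pvQ l1) := by
      refine Prod.ext ?_ ?_
      · exact foldl_step_zero_fst l1 h1
      · exact foldl_step_zero_snd l1
    have hle := pvQ_dropLast_le l1
    have := foldl_step_snd l2 (pvQ l1.dropLast) (pvQ l1) hle
    rw [← foldl_step_zero_snd (l1 ++ l2), List.foldl_append, hfold, this]
    omega

theorem pvQuad_eq (l : List Int) :
    pvQuad l = (pvQ l, pvQ l.tail, pvQ l.dropLast, pvQ l.tail.dropLast) := by
  induction l using pvQuad.induct with
  | case1 => simp [pvQuad, pvQ]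
  | case2 x => rw [pvQuad]; simp [pvQ, max_comm]
  | case3 x y t l m fL tL dL tdL heqL fR tR dR tdR heqR ihL ihR =>
    clear heqL heqR fL tL dL tdL fR tR dR tdR
    rw [pvQuad]
    simp only [show m = (x :: y :: t).length / 2 from rfl,
      show l = x :: y :: t from rfl] at ihL ihR
    rw [ihL, ihR]
    dsimp only
    set L := (x :: y :: t).take ((x :: y :: t).length / 2) with hL
    set R := (x :: y :: t).drop ((x :: y :: t).length / 2) with hR
    have hl : x :: y :: t = L ++ R := by rw [hL, hR, List.take_append_drop]
    have hLne : L ≠ [] := by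
      rw [hL]; intro hc
      have := congrArg List.length hc
      simp at this
    have hRne : R ≠ [] := by
      rw [hR]; intro hc
      have := congrArg List.length hc
      simp at this
      omega
    have htail : (L ++ R).tail = L.tail ++ R := List.tail_append_of_ne_nil hLne
    have hdrop : (L ++ R).dropLast = L ++ R.dropLast := List.dropLast_append_of_ne_nil hRne
    have htd : (L.tail ++ R).dropLast = L.tail ++ R.dropLast :=
      List.dropLast_append_of_ne_nil hRne
    rw [hl, htail, hdrop, htd, pvQ_append L R, pvQ_append L.tail R,
      pvQ_append L R.dropLast, pvQ_append L.tail R.dropLast, tail_dropLast R]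

-- A's dp array after the first m loop iterations of collect(s)
def pvDP (sticker : List Int) (s m : Nat) : List Int :=
  (PySem.List.pyRange ((s : Int) + 2) ((s : Int) + 2 + (m : Int)) 1).foldl
    (fun dp i =>
      PySem.List.pySetD dp (PySem.Int.mod i (sticker.length : Int))
        (max (PySem.List.pyGetD dp (PySem.Int.mod (i - 1) (sticker.length : Int)) 0)
             (PySem.List.pyGetD dp (PySem.Int.mod (i - 2) (sticker.length : Int)) 0 +
              PySem.List.pyGetD sticker (PySem.Int.mod i (sticker.length : Int)) 0)))
    (PySem.List.pySetD
      (PySem.List.pySetD (List.replicate sticker.length 0) (s : Int)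
        (PySem.List.pyGetD sticker (s : Int) 0))
      ((s : Int) + 1) (PySem.List.pyGetD sticker (s : Int) 0))

theorem pvDP_zero (sticker : List Int) (s : Nat) :
    pvDP sticker s 0 =
      PySem.List.pySetD
        (PySem.List.pySetD (List.replicate sticker.length 0) (s : Int)
          (PySem.List.pyGetD sticker (s : Int) 0))
        ((s : Int) + 1) (PySem.List.pyGetD sticker (s : Int) 0) := by
  unfold pvDP
  rw [PySem.List.pyRange_one_eq_nil (by omega)]
  rfl

theorem pvDP_succ (sticker : List Int) (s m : Nat) :
    pvDP sticker s (m + 1) =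
      PySem.List.pySetD (pvDP sticker s m) (((s + 2 + m) % sticker.length : Nat) : Int)
        (max (PySem.List.pyGetD (pvDP sticker s m) (((s + 1 + m) % sticker.length : Nat) : Int) 0)
             (PySem.List.pyGetD (pvDP sticker s m) (((s + m) % sticker.length : Nat) : Int) 0 +
              PySem.List.pyGetD sticker (((s + 2 + m) % sticker.length : Nat) : Int) 0)) := by
  have e0 : (s : Int) + 2 + ((m + 1 : Nat) : Int) = ((s : Int) + 2 + (m : Int)) + 1 := by
    push_cast; ring
  have e1 : (s : Int) + 2 + (m : Int) = ((s + 2 + m : Nat) : Int) := by push_cast; ring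
  have e2 : ((s + 2 + m : Nat) : Int) - 1 = ((s + 1 + m : Nat) : Int) := by push_cast; ring
  have e3 : ((s + 2 + m : Nat) : Int) - 2 = ((s + m : Nat) : Int) := by push_cast; ring
  unfold pvDP
  rw [e0, PySem.List.pyRange_one_succ_right (by omega), List.foldl_append]
  simp only [List.foldl_cons, List.foldl_nil]
  rw [e1, e2, e3]
  simp only [PySem.Int.mod_natCast]

theorem pvDP_inv (sticker : List Int) (s : Nat) (hs : s ≤ 2) (hn : 4 ≤ sticker.length)
    (m : Nat) (hm : m ≤ sticker.length - 3) :
    (pvDP sticker s m).length = sticker.length ∧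
    PySem.List.pyGetD (pvDP sticker s m) ((((s + m) % sticker.length : Nat) : Int)) 0
      = PySem.List.pyGetD sticker (s : Int) 0 + (pvPair (pvF sticker s) m).1 ∧
    PySem.List.pyGetD (pvDP sticker s m) ((((s + 1 + m) % sticker.length : Nat) : Int)) 0
      = PySem.List.pyGetD sticker (s : Int) 0 + (pvPair (pvF sticker s) m).2 := by
  induction m with
  | zero =>
    have hsN : s < sticker.length := by omega
    have hs1N : s + 1 < sticker.length := by omega
    have ec : (s : Int) + 1 = ((s + 1 : Nat) : Int) := by push_cast; ring
    rw [pvDP_zero, ec]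
    have hlen1 : (PySem.List.pySetD (List.replicate sticker.length (0:Int)) (s : Int)
        (PySem.List.pyGetD sticker (s : Int) 0)).length = sticker.length := by
      simp
    refine ⟨by simp, ?_, ?_⟩
    · simp only [Nat.add_zero]
      rw [Nat.mod_eq_of_lt hsN,
        PySem.List.pyGetD_pySetD_natCast _ _ _ _ _ (by rw [hlen1]; exact hs1N),
        if_neg (by omega : ¬ s = s + 1),
        PySem.List.pyGetD_pySetD_natCast _ _ _ _ _ (by simp [hsN]),
        if_pos rfl]
      simp [pvPair]
    · simp only [Nat.add_zero]
      rw [Nat.mod_eq_of_lt hs1N,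
        PySem.List.pyGetD_pySetD_natCast _ _ _ _ _ (by rw [hlen1]; exact hs1N),
        if_pos rfl]
      simp [pvPair]
  | succ m ih =>
    obtain ⟨ihlen, ihprev, ihcur⟩ := ih (by omega)
    have hN0 : 0 < sticker.length := by omega
    have hw : (s + 2 + m) % sticker.length < sticker.length := Nat.mod_lt _ hN0
    rw [pvDP_succ, ihprev, ihcur]
    have hval : max (PySem.List.pyGetD sticker (s : Int) 0 + (pvPair (pvF sticker s) m).2)
        (PySem.List.pyGetD sticker (s : Int) 0 + (pvPair (pvF sticker s) m).1 +
          PySem.List.pyGetD sticker (((s + 2 + m) % sticker.length : Nat) : Int) 0)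
        = PySem.List.pyGetD sticker (s : Int) 0 + (pvPair (pvF sticker s) (m + 1)).2 := by
      have hF : PySem.List.pyGetD sticker (((s + 2 + m) % sticker.length : Nat) : Int) 0
          = pvF sticker s m := by
        rw [PySem.List.pyGetD_natCast]; rfl
      rw [hF, add_assoc, max_add_add_left]
      rfl
    refine ⟨by rw [PySem.List.length_pySetD]; exact ihlen, ?_, ?_⟩
    · have e : s + (m + 1) = s + 1 + m := by omega
      rw [e, PySem.List.pyGetD_pySetD_natCast _ _ _ _ _ (by rw [ihlen]; exact hw),
        if_neg (by
          intro h
          have hdvd : sticker.length ∣ (s + 2 + m) - (s + 1 + m) :=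
            (Nat.modEq_iff_dvd' (by omega)).mp h
          have := Nat.le_of_dvd (by omega) hdvd
          omega), ihcur]
      rfl
    · have e : s + 1 + (m + 1) = s + 2 + m := by omega
      rw [e, PySem.List.pyGetD_pySetD_natCast _ _ _ _ _ (by rw [ihlen]; exact hw), if_pos rfl, hval]

theorem pvCollect_eq (sticker : List Int) (s : Nat) (hs : s ≤ 2) (hn : 4 ≤ sticker.length) :
    pvCollect sticker (sticker.length : Int) (s : Int)
      = PySem.List.pyGetD sticker (s : Int) 0
        + (pvPair (pvF sticker s) (sticker.length - 3)).2 := by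
  have hN3 : (sticker.length : Int) - 1 + (s : Int)
      = (s : Int) + 2 + ((sticker.length - 3 : Nat) : Int) := by omega
  have hidx : (s : Int) - 2 + (sticker.length : Int)
      = ((s + 1 + (sticker.length - 3) : Nat) : Int) := by omega
  simp only [pvCollect, Int.toNat_natCast]
  rw [hN3, hidx, PySem.Int.mod_natCast]
  exact (pvDP_inv sticker s hs hn (sticker.length - 3) le_rfl).2.2

-- B's window slice of the doubled list, element by element
theorem window_spec (sticker : List Int) (hn : 4 ≤ sticker.length) (s : Nat) (hs : s ≤ 2) :
    (PySem.List.slice (sticker ++ sticker) (some ((s : Int) + 2))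
        (some ((s : Int) + (sticker.length : Int) - 1))).length = sticker.length - 3 ∧
    ∀ k < sticker.length - 3,
      (PySem.List.slice (sticker ++ sticker) (some ((s : Int) + 2))
        (some ((s : Int) + (sticker.length : Int) - 1))).getD k 0 = pvF sticker s k := by
  rw [PySem.List.slice_of_nonneg (sticker ++ sticker)
    (by omega) (by omega)
    (by push_cast [List.length_append]; omega) (by push_cast [List.length_append]; omega)]
  have ht : ((s : Int) + (sticker.length : Int) - 1).toNat - ((s : Int) + 2).toNat
      = sticker.length - 3 := by omega
  have hd : ((s : Int) + 2).toNat = s + 2 := by omega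
  rw [ht, hd]
  constructor
  · simp; omega
  · intro k hk
    unfold pvF
    simp only [List.getD_eq_getElem?_getD]
    rw [List.getElem?_take_of_lt hk, List.getElem?_drop]
    by_cases hc : s + 2 + k < sticker.length
    · rw [Nat.mod_eq_of_lt hc, List.getElem?_append_left hc]
    · have he : s + 2 + k = sticker.length := by omega
      rw [he, Nat.mod_self, List.getElem?_append_right (le_refl _), Nat.sub_self]

theorem window_eq (sticker : List Int) (s : Nat)
    (w : List Int) (hlen : w.length = sticker.length - 3)
    (hget : ∀ k < sticker.length - 3, w.getD k 0 = pvF sticker s k) :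
    pvQ w = (pvPair (pvF sticker s) (sticker.length - 3)).2 := by
  rw [← foldl_step_zero_snd, foldl_eq_pvPair, hlen,
    pvPair_congr _ _ _ (fun k hk => hget k hk)]

-- ===== VERDICT (by name: the statement is the Claim_ definition above) =====
theorem solution_spec : Claim_equal_solution := by
  intro sticker _ _
  unfold Spec_solution solution solution_alt
  by_cases hN : (sticker.length : Int) < 4
  · rw [if_pos hN, if_pos hN]
  · have hn : 4 ≤ sticker.length := by omega
    rw [if_neg hN, if_neg hN]
    have hr : PySem.List.pyRange 0 3 1 = [0, 1, 2] := by decide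
    rw [hr]
    simp only [List.map_cons, List.map_nil]
    have e0 : ((0 : Nat) : Int) = (0 : Int) := by norm_num
    have e1 : ((1 : Nat) : Int) = (1 : Int) := by norm_num
    have e2 : ((2 : Nat) : Int) = (2 : Int) := by norm_num
    have hc0 := pvCollect_eq sticker 0 (by omega) hn
    have hc1 := pvCollect_eq sticker 1 (by omega) hn
    have hc2 := pvCollect_eq sticker 2 (by omega) hn
    rw [e0] at hc0; rw [e1] at hc1; rw [e2] at hc2
    rw [hc0, hc1, hc2]
    have hw0 := window_spec sticker hn 0 (by omega)
    have hw1 := window_spec sticker hn 1 (by omega)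
    have hw2 := window_spec sticker hn 2 (by omega)
    rw [e0] at hw0; rw [e1] at hw1; rw [e2] at hw2
    have hq0 : (pvQuad (PySem.List.slice (sticker ++ sticker) (some (0 + 2))
        (some (0 + (sticker.length : Int) - 1)))).1
        = (pvPair (pvF sticker 0) (sticker.length - 3)).2 := by
      rw [pvQuad_eq]
      exact window_eq sticker 0 _ (by simpa using hw0.1) (by simpa using hw0.2)
    have hq1 : (pvQuad (PySem.List.slice (sticker ++ sticker) (some (1 + 2))
        (some (1 + (sticker.length : Int) - 1)))).1
        = (pvPair (pvF sticker 1) (sticker.length - 3)).2 := by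
      rw [pvQuad_eq]
      exact window_eq sticker 1 _ (by simpa using hw1.1) (by simpa using hw1.2)
    have hq2 : (pvQuad (PySem.List.slice (sticker ++ sticker) (some (2 + 2))
        (some (2 + (sticker.length : Int) - 1)))).1
        = (pvPair (pvF sticker 2) (sticker.length - 3)).2 := by
      rw [pvQuad_eq]
      exact window_eq sticker 2 _ (by simpa using hw2.1) (by simpa using hw2.2)
    rw [hq0, hq1, hq2, PySem.List.max?_id_cons]
    simp only [List.foldl_cons, List.foldl_nil, Option.getD_some]
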